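-- pv_equiv track=rewrite | github.com/SebastianOpiyo/algorithms | codility_challanges/challange1.py | solution
-- ===== SOURCE A (Python) =====
-- def solution(s):
--     string_len = len(s)
--     possible_split = 0
--
--     # Prefix and suffix array for to determine distinct char from
--     # start and end
--     prefix = [0] * string_len
--     suffix = [0] * string_len
--
--     freq = [0] * 26
--
--     # Calculating prefix array
--     for i in range(string_len):
--
--         prev = prefix[i - 1] if (i - 1 >= 0) else 0
--
--         # Character appears for 1st time in string
--         if freq[ord(s[i]) - ord('a')] == 0:
--             prefix[i] += (prev + 1)
--
--         else:
--             prefix[i] = prev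
--         freq[ord(s[i]) - ord('a')] = 1
--
--     # Resetting seen for
--     # suffix calculation
--     freq = [0] * len(freq)
--
--     # Calculating the suffix array
--     suffix[string_len - 1] = 0
--     for i in range(string_len - 1, 0, -1):
--         prev = suffix[i]
--
--         # char first appearance
--         if freq[ord(s[i]) - ord('a')] == 0:
--             suffix[i - 1] += (prev + 1)
--
--         else:
--             suffix[i - 1] = prev
--
--         # char appeared
--         freq[ord(s[i]) - ord('a')] = 1
--
--     for i in range(string_len):
--         if prefix[i] == suffix[i]:
--             possible_split += 1
--
--     return possible_split
-- ===== SOURCE B (Python) =====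
-- def solution(s):
--     n = len(s)
--     # one pass: first/last occurrence index per letter slot (size-26 tables,
--     # indexed by ord(c) - ord('a') exactly as A indexes its freq table)
--     first = [-1] * 26
--     last = [-1] * 26
--     for i in range(n):
--         k = ord(s[i]) - ord('a')
--         if first[k] == -1:
--             first[k] = i
--         last[k] = i
--     # running distinct counters instead of prefix/suffix arrays
--     suf = len([k for k in range(26) if last[k] != -1])
--     pref = 0
--     count = 0
--     for i in range(n):
--         k = ord(s[i]) - ord('a')
--         if first[k] == i:
--             pref += 1
--         if last[k] == i:
--             suf -= 1
--         if pref == suf: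
--             count += 1
--     return count
-- ===== Notes on version B (the rewrite author's own statement) =====
-- stated objective: faster
-- what changed: Replaces A's two seen-flag scans that build length-n prefix/suffix arrays (plus a third comparison pass) with a single pass recording first/last occurrence indices in two 26-slot tables, then one pass maintaining running prefix/suffix distinct counters as scalars and counting equal split points on the fly.
import Mathlib
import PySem

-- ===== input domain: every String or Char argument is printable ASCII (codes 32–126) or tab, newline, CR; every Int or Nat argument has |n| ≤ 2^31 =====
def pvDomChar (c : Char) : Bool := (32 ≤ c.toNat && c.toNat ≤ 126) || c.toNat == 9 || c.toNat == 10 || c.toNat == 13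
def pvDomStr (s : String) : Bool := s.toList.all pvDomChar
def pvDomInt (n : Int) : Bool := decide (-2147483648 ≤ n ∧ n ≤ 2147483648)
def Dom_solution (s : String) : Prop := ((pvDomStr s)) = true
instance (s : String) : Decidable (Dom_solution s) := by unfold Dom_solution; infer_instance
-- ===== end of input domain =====

-- B replaces A's two seen-flag passes building length-n prefix/suffix arrays by a
-- first/last-occurrence table (26 slots) plus one pass with running distinct counters.


-- ===== PORT A =====
def pySetIdx (xs : List Int) (i : Int) (v : Int) : List Int :=
  match PySem.List.pyIdx? xs.length i with
  | some k => xs.set k v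
  | none => xs

def stepA1 (cs : List Char) (st : List Int × List Int) (i : Int) : List Int × List Int :=
  ( if PySem.List.pyGetD st.2 (((PySem.List.pyGetD cs i ' ').toNat : Int) - 97) 0 == 0
      then pySetIdx st.1 i (PySem.List.pyGetD st.1 i 0 +
             ((if 0 ≤ i - 1 then PySem.List.pyGetD st.1 (i - 1) 0 else 0) + 1))
      else pySetIdx st.1 i (if 0 ≤ i - 1 then PySem.List.pyGetD st.1 (i - 1) 0 else 0),
    pySetIdx st.2 (((PySem.List.pyGetD cs i ' ').toNat : Int) - 97) 1 )

def stepA2 (cs : List Char) (st : List Int × List Int) (i : Int) : List Int × List Int :=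
  ( if PySem.List.pyGetD st.2 (((PySem.List.pyGetD cs i ' ').toNat : Int) - 97) 0 == 0
      then pySetIdx st.1 (i - 1) (PySem.List.pyGetD st.1 (i - 1) 0 +
             (PySem.List.pyGetD st.1 i 0 + 1))
      else pySetIdx st.1 (i - 1) (PySem.List.pyGetD st.1 i 0),
    pySetIdx st.2 (((PySem.List.pyGetD cs i ' ').toNat : Int) - 97) 1 )

def solution (s : String) : Int :=
  let cs := s.toList
  let n : Int := (cs.length : Int)
  let st1 := (PySem.List.pyRange 0 n).foldl (stepA1 cs)
    (List.replicate cs.length 0, List.replicate 26 0)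
  let st2 := (PySem.List.pyRange (n - 1) 0 (-1)).foldl (stepA2 cs)
    (pySetIdx (List.replicate cs.length 0) (n - 1) 0, List.replicate 26 0)
  (PySem.List.pyRange 0 n).foldl (fun acc i =>
    if PySem.List.pyGetD st1.1 i 0 == PySem.List.pyGetD st2.1 i 0 then acc + 1 else acc) 0

-- ===== PORT B =====
def stepB1 (cs : List Char) (st : List Int × List Int) (i : Int) : List Int × List Int :=
  ( if PySem.List.pyGetD st.1 (((PySem.List.pyGetD cs i ' ').toNat : Int) - 97) (-1) == -1
      then pySetIdx st.1 (((PySem.List.pyGetD cs i ' ').toNat : Int) - 97) i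
      else st.1,
    pySetIdx st.2 (((PySem.List.pyGetD cs i ' ').toNat : Int) - 97) i )

def stepB2 (cs : List Char) (fl : List Int × List Int) (st : Int × Int × Int) (i : Int) :
    Int × Int × Int :=
  let pref := if PySem.List.pyGetD fl.1 (((PySem.List.pyGetD cs i ' ').toNat : Int) - 97) (-1) == i
    then st.1 + 1 else st.1
  let suf := if PySem.List.pyGetD fl.2 (((PySem.List.pyGetD cs i ' ').toNat : Int) - 97) (-1) == i
    then st.2.1 - 1 else st.2.1
  (pref, suf, if pref == suf then st.2.2 + 1 else st.2.2)

def solution_alt (s : String) : Int :=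
  let cs := s.toList
  let n : Int := (cs.length : Int)
  let fl := (PySem.List.pyRange 0 n).foldl (stepB1 cs)
    (List.replicate 26 (-1), List.replicate 26 (-1))
  let suf0 : Int :=
    (((PySem.List.pyRange 0 26).filter (fun k => PySem.List.pyGetD fl.2 k (-1) != -1)).length : Int)
  ((PySem.List.pyRange 0 n).foldl (stepB2 cs fl) (0, suf0, 0)).2.2

-- ===== PRECONDITION & SPEC =====
-- Pre_ excludes exactly the inputs where the Python A raises IndexError: the empty string
-- (A assigns into index -1 of an empty suffix list) and strings containing a character with
-- code outside 71..122, whose freq-table index falls outside [-26, 25] of the size-26 table.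
def Pre_solution (s : String) : Prop :=
  s.toList ≠ [] ∧ s.toList.all (fun c => 71 ≤ c.toNat && c.toNat ≤ 122) = true
instance (s : String) : Decidable (Pre_solution s) := by unfold Pre_solution; infer_instance
def pvWitness_solution : String := "aacaba"


def Spec_solution (s : String) (out : Int) : Prop := out = solution_alt s
instance (s : String) (out : Int) : Decidable (Spec_solution s out) := by unfold Spec_solution; infer_instance

-- ===== CLAIM (what is proved, stated in full; the proofs are below) =====
def Claim_equal_solution : Prop := ∀ (s : String), Dom_solution s → Pre_solution s → Spec_solution s (solution s)

-- ===== LEMMAS AND PROOFS =====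
def wSlot (c : Char) : Nat := (c.toNat + 7) % 26

theorem wSlot_lt (c : Char) : wSlot c < 26 := Nat.mod_lt _ (by norm_num)

def Dc (l : List Char) : Int := ((l.map wSlot).toFinset.card : Int)

theorem Dc_nil : Dc [] = 0 := by simp [Dc]

theorem getK (xs : List Int) (h : xs.length = 26) (c : Char)
    (h1 : 71 ≤ c.toNat) (h2 : c.toNat ≤ 122) (d : Int) :
    PySem.List.pyGetD xs ((c.toNat : Int) - 97) d = xs.getD (wSlot c) d := by
  unfold PySem.List.pyGetD PySem.List.pyGet? PySem.List.pyIdx?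
  rw [h, List.getD_eq_getElem?_getD]
  split_ifs with p q r
  · have e : ((c.toNat : Int) - 97).toNat = wSlot c := by unfold wSlot; omega
    rw [e]; rfl
  · omega
  · have e : 26 - (-(((c.toNat : Int) - 97))).toNat = wSlot c := by unfold wSlot; omega
    rw [e]; rfl
  · omega

theorem setK (xs : List Int) (h : xs.length = 26) (c : Char)
    (h1 : 71 ≤ c.toNat) (h2 : c.toNat ≤ 122) (v : Int) :
    pySetIdx xs ((c.toNat : Int) - 97) v = xs.set (wSlot c) v := by
  unfold pySetIdx PySem.List.pyIdx?
  rw [h]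
  split_ifs with p q r
  · have e : ((c.toNat : Int) - 97).toNat = wSlot c := by unfold wSlot; omega
    rw [e]
  · omega
  · have e : 26 - (-(((c.toNat : Int) - 97))).toNat = wSlot c := by unfold wSlot; omega
    rw [e]
  · omega

theorem setI (xs : List Int) (i : Nat) (v : Int) : pySetIdx xs (i : Int) v = xs.set i v := by
  unfold pySetIdx PySem.List.pyIdx?
  split_ifs with p q
  · simp
  · show xs = xs.set i v
    exact (List.set_eq_of_length_le (by omega)).symm
  all_goals exact absurd (Int.natCast_nonneg i) p

theorem map_range_set (n : Nat) (f : Nat → Int) (k : Nat) (v : Int) :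
    ((List.range n).map f).set k v = (List.range n).map (fun j => if j = k then v else f j) := by
  apply List.ext_getElem (by simp)
  intro i h1 h2
  simp only [List.getElem_set, List.getElem_map, List.getElem_range]
  split_ifs with ha hb hb
  · rfl
  · exact absurd ha.symm hb
  · exact absurd hb.symm ha
  · rfl

theorem map_range_getD (n : Nat) (f : Nat → Int) (k : Nat) (hk : k < n) (d : Int) :
    ((List.range n).map f).getD k d = f k := by
  rw [List.getD_eq_getElem?_getD]
  simp [hk]

theorem replicate_eq_map (n : Nat) (v : Int) :
    List.replicate n v = (List.range n).map (fun _ => v) := by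
  simp [List.map_const']

theorem Dc_cons (c : Char) (l : List Char) :
    Dc (c :: l) = Dc l + (if wSlot c ∈ l.map wSlot then 0 else 1) := by
  unfold Dc
  simp only [List.map_cons, List.toFinset_cons]
  by_cases hm : wSlot c ∈ l.map wSlot
  · rw [Finset.insert_eq_self.mpr (by simpa using hm)]
    simp [hm]
  · rw [Finset.card_insert_of_notMem (by simpa using hm)]
    push_cast; simp [hm]

theorem Dc_append (l : List Char) (c : Char) :
    Dc (l ++ [c]) = Dc l + (if wSlot c ∈ l.map wSlot then 0 else 1) := by
  have h2 : ((l ++ [c]).map wSlot).toFinset = ((c :: l).map wSlot).toFinset := by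
    ext x; simp only [List.mem_toFinset, List.map_append, List.map_cons, List.mem_append,
      List.mem_cons, List.map_nil, List.mem_singleton, List.not_mem_nil, or_false]; tauto
  calc Dc (l ++ [c]) = Dc (c :: l) := by unfold Dc; rw [h2]
    _ = _ := Dc_cons c l

def tbl (l : List Char) : List Int :=
  (List.range 26).map (fun t => if t ∈ l.map wSlot then 1 else 0)

theorem tbl_len (l : List Char) : (tbl l).length = 26 := by simp [tbl]

theorem tbl_nil : tbl [] = List.replicate 26 0 := by
  rw [replicate_eq_map]
  unfold tbl
  exact List.map_congr_left (by intro t _; simp)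

def preA (cs : List Char) (m : Nat) : List Int :=
  (List.range cs.length).map (fun j => if j < m then Dc (cs.take (j + 1)) else 0)

theorem take_succ_concat (cs : List Char) (m : Nat) (hm : m < cs.length) :
    cs.take (m + 1) = cs.take m ++ [cs[m]] := by
  rw [List.take_succ]; simp [List.getElem?_eq_getElem hm]

set_option maxHeartbeats 1000000 in
theorem loopA1 (cs : List Char) (H : ∀ c ∈ cs, 71 ≤ c.toNat ∧ c.toNat ≤ 122)
    (m : Nat) (hm : m ≤ cs.length) :
    (PySem.List.pyRange 0 (m : Int)).foldl (stepA1 cs)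
      (List.replicate cs.length 0, List.replicate 26 0)
    = (preA cs m, tbl (cs.take m)) := by
  induction m with
  | zero =>
      show (PySem.List.pyRange 0 0).foldl _ _ = _
      rw [show PySem.List.pyRange 0 0 = [] from rfl]
      simp only [List.foldl_nil]
      rw [Prod.mk.injEq]
      refine ⟨?_, ?_⟩
      · rw [replicate_eq_map]
        unfold preA
        exact List.map_congr_left (by intro j _; simp)
      · rw [replicate_eq_map]
        unfold tbl
        exact List.map_congr_left (by intro t _; simp)
  | succ m ih =>
      have hml : m < cs.length := by omega
      have hc := H cs[m] (List.getElem_mem hml)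
      rw [show ((m + 1 : Nat) : Int) = (m : Int) + 1 by push_cast; ring,
        PySem.List.pyRange_one_succ_right (by positivity), List.foldl_append,
        ih (by omega)]
      simp only [List.foldl_cons, List.foldl_nil, stepA1]
      have hchar : PySem.List.pyGetD cs (m : Int) ' ' = cs[m] := by
        rw [PySem.List.pyGetD_natCast, List.getD_eq_getElem _ _ hml]
      have hseen : PySem.List.pyGetD (preA cs m, tbl (cs.take m)).2
          (((PySem.List.pyGetD cs (m : Int) ' ').toNat : Int) - 97) 0
          = if wSlot cs[m] ∈ (cs.take m).map wSlot then 1 else 0 := by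
        rw [hchar, getK _ (tbl_len _) _ hc.1 hc.2]
        unfold tbl
        rw [map_range_getD _ _ _ (wSlot_lt _)]
      have hprev : (if (0 : Int) ≤ (m : Int) - 1
          then PySem.List.pyGetD (preA cs m, tbl (cs.take m)).1 ((m : Int) - 1) 0 else 0)
          = Dc (cs.take m) := by
        match m with
        | 0 => simp [Dc_nil]
        | k + 1 =>
            rw [if_pos (by push_cast; omega),
              show ((k + 1 : Nat) : Int) - 1 = (k : Int) by push_cast; ring]
            show PySem.List.pyGetD (preA cs (k + 1)) (k : Int) 0 = _
            rw [PySem.List.pyGetD_natCast]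
            unfold preA
            rw [map_range_getD _ _ _ (by omega)]
            simp
      have hcur : PySem.List.pyGetD (preA cs m, tbl (cs.take m)).1 (m : Int) 0 = 0 := by
        show PySem.List.pyGetD (preA cs m) (m : Int) 0 = 0
        rw [PySem.List.pyGetD_natCast]
        unfold preA
        rw [map_range_getD _ _ _ hml]
        simp
      have htake := take_succ_concat cs m hml
      have hDc : Dc (cs.take (m + 1))
          = Dc (cs.take m) + (if wSlot cs[m] ∈ (cs.take m).map wSlot then 0 else 1) := by
        rw [htake, Dc_append]
      have hfreq : pySetIdx (preA cs m, tbl (cs.take m)).2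
          (((PySem.List.pyGetD cs (m : Int) ' ').toNat : Int) - 97) 1 = tbl (cs.take (m + 1)) := by
        rw [hchar, setK _ (tbl_len _) _ hc.1 hc.2]
        show (tbl (cs.take m)).set (wSlot cs[m]) 1 = _
        unfold tbl
        rw [map_range_set, htake]
        apply List.map_congr_left
        intro t _
        simp only [List.map_append, List.map_cons, List.map_nil, List.mem_append,
          List.mem_cons, List.not_mem_nil, or_false]
        by_cases ht : t = wSlot cs[m]
        · rw [if_pos ht, if_pos (Or.inr ht)]
        · rw [if_neg ht]
          by_cases ht2 : t ∈ (cs.take m).map wSlot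
          · rw [if_pos ht2, if_pos (Or.inl ht2)]
          · rw [if_neg ht2, if_neg (by tauto)]
      by_cases hmem : wSlot cs[m] ∈ (cs.take m).map wSlot
      · rw [if_neg (by rw [hseen, if_pos hmem]; decide)]
        have hDc' : Dc (cs.take (m + 1)) = Dc (cs.take m) := by
          rw [hDc, if_pos hmem, add_zero]
        refine Prod.ext ?_ hfreq
        show pySetIdx (preA cs m) (m : Int) _ = preA cs (m + 1)
        rw [hprev, setI]
        unfold preA
        rw [map_range_set]
        apply List.map_congr_left
        intro j _
        by_cases hj : j = m
        · subst hj
          rw [if_pos rfl, if_pos (Nat.lt_succ_self j), hDc']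
        · rw [if_neg hj]
          by_cases hj3 : j < m
          · rw [if_pos hj3, if_pos (by omega)]
          · rw [if_neg hj3, if_neg (by omega)]
      · rw [if_pos (by rw [hseen, if_neg hmem]; decide)]
        have hDc' : (0 : Int) + (Dc (cs.take m) + 1) = Dc (cs.take (m + 1)) := by
          rw [hDc, if_neg hmem]; ring
        refine Prod.ext ?_ hfreq
        show pySetIdx (preA cs m) (m : Int) _ = preA cs (m + 1)
        rw [hprev, hcur, setI]
        unfold preA
        rw [map_range_set]
        apply List.map_congr_left
        intro j _
        by_cases hj : j = m
        · subst hj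
          rw [if_pos rfl, if_pos (Nat.lt_succ_self j), hDc']
        · rw [if_neg hj]
          by_cases hj3 : j < m
          · rw [if_pos hj3, if_pos (by omega)]
          · rw [if_neg hj3, if_neg (by omega)]

def sufA (cs : List Char) (m : Nat) : List Int :=
  (List.range cs.length).map (fun j => if m ≤ j then Dc (cs.drop (j + 1)) else 0)

theorem pyRange_down (m : Nat) :
    PySem.List.pyRange ((m + 1 : Nat) : Int) 0 (-1)
      = ((m + 1 : Nat) : Int) :: PySem.List.pyRange ((m : Nat) : Int) 0 (-1) := by
  unfold PySem.List.pyRange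
  norm_num
  rw [show (if 0 < m then m else 0) = m by split_ifs <;> omega, List.range_succ_eq_map]
  simp only [List.map_cons, List.map_map, Nat.cast_zero]
  refine List.cons_eq_cons.mpr ⟨by ring, ?_⟩
  apply List.map_congr_left
  intro k _
  simp only [Function.comp_apply, Nat.succ_eq_add_one]
  push_cast
  ring

set_option maxHeartbeats 1000000 in
theorem loopA2 (cs : List Char) (H : ∀ c ∈ cs, 71 ≤ c.toNat ∧ c.toNat ≤ 122)
    (m : Nat) (hm : m ≤ cs.length - 1) :
    ∃ fr, (PySem.List.pyRange (m : Int) 0 (-1)).foldl (stepA2 cs)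
        (sufA cs m, tbl (cs.drop (m + 1)))
      = ((List.range cs.length).map (fun j => Dc (cs.drop (j + 1))), fr) := by
  induction m with
  | zero =>
      refine ⟨tbl (cs.drop 1), ?_⟩
      show List.foldl _ _ (PySem.List.pyRange 0 0 (-1)) = _
      rw [show PySem.List.pyRange 0 0 (-1) = [] from rfl]
      simp only [List.foldl_nil]
      refine Prod.ext ?_ rfl
      show sufA cs 0 = _
      unfold sufA
      exact List.map_congr_left (by intro j _; simp)
  | succ m ih =>
      have hml : m + 1 < cs.length := by omega
      have hc := H cs[m + 1] (List.getElem_mem hml)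
      rw [pyRange_down m, List.foldl_cons]
      have hchar : PySem.List.pyGetD cs ((m + 1 : Nat) : Int) ' ' = cs[m + 1] := by
        rw [PySem.List.pyGetD_natCast, List.getD_eq_getElem _ _ hml]
      have hdrop : cs.drop (m + 1) = cs[m + 1] :: cs.drop (m + 2) :=
        List.drop_eq_getElem_cons hml
      have hseen : PySem.List.pyGetD (sufA cs (m + 1), tbl (cs.drop (m + 1 + 1))).2
          (((PySem.List.pyGetD cs ((m + 1 : Nat) : Int) ' ').toNat : Int) - 97) 0
          = if wSlot cs[m + 1] ∈ (cs.drop (m + 2)).map wSlot then 1 else 0 := by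
        rw [hchar, getK _ (tbl_len _) _ hc.1 hc.2]
        unfold tbl
        rw [map_range_getD _ _ _ (wSlot_lt _)]
      have hprev : PySem.List.pyGetD (sufA cs (m + 1), tbl (cs.drop (m + 1 + 1))).1
          ((m + 1 : Nat) : Int) 0 = Dc (cs.drop (m + 2)) := by
        show PySem.List.pyGetD (sufA cs (m + 1)) _ 0 = _
        rw [PySem.List.pyGetD_natCast]
        unfold sufA
        rw [map_range_getD _ _ _ hml]
        simp
      have him : ((m + 1 : Nat) : Int) - 1 = ((m : Nat) : Int) := by push_cast; ring
      have hcur : PySem.List.pyGetD (sufA cs (m + 1), tbl (cs.drop (m + 1 + 1))).1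
          (((m + 1 : Nat) : Int) - 1) 0 = 0 := by
        show PySem.List.pyGetD (sufA cs (m + 1)) _ 0 = 0
        rw [him, PySem.List.pyGetD_natCast]
        unfold sufA
        rw [map_range_getD _ _ _ (by omega)]
        simp
      have hDc : Dc (cs.drop (m + 1))
          = Dc (cs.drop (m + 2)) + (if wSlot cs[m + 1] ∈ (cs.drop (m + 2)).map wSlot then 0 else 1) := by
        rw [hdrop, Dc_cons]
      have hfreq : pySetIdx (sufA cs (m + 1), tbl (cs.drop (m + 1 + 1))).2
          (((PySem.List.pyGetD cs ((m + 1 : Nat) : Int) ' ').toNat : Int) - 97) 1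
          = tbl (cs.drop (m + 1)) := by
        rw [hchar, setK _ (tbl_len _) _ hc.1 hc.2]
        show (tbl (cs.drop (m + 1 + 1))).set (wSlot cs[m + 1]) 1 = _
        unfold tbl
        rw [map_range_set, hdrop]
        apply List.map_congr_left
        intro t _
        simp only [List.map_cons, List.mem_cons]
        by_cases ht : t = wSlot cs[m + 1]
        · rw [if_pos ht, if_pos (Or.inl ht)]
        · rw [if_neg ht]
          by_cases ht2 : t ∈ (cs.drop (m + 2)).map wSlot
          · rw [if_pos ht2, if_pos (Or.inr ht2)]
          · rw [if_neg ht2, if_neg (by tauto)]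
      have hstep : stepA2 cs (sufA cs (m + 1), tbl (cs.drop (m + 1 + 1))) ((m + 1 : Nat) : Int)
          = (sufA cs m, tbl (cs.drop (m + 1))) := by
        unfold stepA2
        by_cases hmem : wSlot cs[m + 1] ∈ (cs.drop (m + 2)).map wSlot
        · rw [if_neg (by rw [hseen, if_pos hmem]; decide)]
          have hDc' : Dc (cs.drop (m + 2)) = Dc (cs.drop (m + 1)) := by
            rw [hDc, if_pos hmem, add_zero]
          refine Prod.ext ?_ hfreq
          show pySetIdx (sufA cs (m + 1)) _ _ = sufA cs m
          rw [hprev, him, setI]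
          unfold sufA
          rw [map_range_set]
          apply List.map_congr_left
          intro j _
          by_cases hj : j = m
          · subst hj
            rw [if_pos rfl, if_pos (le_refl j), hDc']
          · rw [if_neg hj]
            by_cases hj3 : m + 1 ≤ j
            · rw [if_pos hj3, if_pos (by omega)]
            · rw [if_neg hj3, if_neg (by omega)]
        · rw [if_pos (by rw [hseen, if_neg hmem]; decide)]
          have hDc' : (0 : Int) + (Dc (cs.drop (m + 2)) + 1) = Dc (cs.drop (m + 1)) := by
            rw [hDc, if_neg hmem]; ring
          refine Prod.ext ?_ hfreq
          show pySetIdx (sufA cs (m + 1)) _ _ = sufA cs m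
          rw [hprev, hcur, him, setI]
          unfold sufA
          rw [map_range_set]
          apply List.map_congr_left
          intro j _
          by_cases hj : j = m
          · subst hj
            rw [if_pos rfl, if_pos (le_refl j), hDc']
          · rw [if_neg hj]
            by_cases hj3 : m + 1 ≤ j
            · rw [if_pos hj3, if_pos (by omega)]
            · rw [if_neg hj3, if_neg (by omega)]
      rw [hstep]
      exact ih (by omega)

def FI : List Nat → Nat → Int
  | [], _ => -1
  | x :: xs, t => if x = t then 0 else (if FI xs t = -1 then -1 else FI xs t + 1)

def LI : List Nat → Nat → Int
  | [], _ => -1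
  | x :: xs, t => if LI xs t = -1 then (if x = t then 0 else -1) else LI xs t + 1

theorem FI_cons (x : Nat) (xs : List Nat) (t : Nat) :
    FI (x :: xs) t = if x = t then 0 else (if FI xs t = -1 then -1 else FI xs t + 1) := rfl

theorem LI_cons (x : Nat) (xs : List Nat) (t : Nat) :
    LI (x :: xs) t = if LI xs t = -1 then (if x = t then 0 else -1) else LI xs t + 1 := rfl

theorem FI_ge (l : List Nat) (t : Nat) : FI l t = -1 ∨ 0 ≤ FI l t := by
  induction l with
  | nil => left; rfl
  | cons x xs ih =>
      rw [FI_cons]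
      by_cases hx : x = t
      · right; rw [if_pos hx]
      · rw [if_neg hx]
        by_cases h2 : FI xs t = -1
        · left; rw [if_pos h2]
        · right; rw [if_neg h2]; rcases ih with h | h; exacts [absurd h h2, by omega]

theorem FI_neg (l : List Nat) (t : Nat) : FI l t = -1 ↔ t ∉ l := by
  induction l with
  | nil => simp [FI]
  | cons x xs ih =>
      rw [FI_cons, List.mem_cons]
      by_cases hx : x = t
      · rw [if_pos hx]
        simp [hx]
      · rw [if_neg hx]
        by_cases h2 : FI xs t = -1
        · rw [if_pos h2]
          exact ⟨fun _ => by rintro (e | e); exacts [hx e.symm, (ih.mp h2) e], fun _ => rfl⟩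
        · rw [if_neg h2]
          have h0 : 0 ≤ FI xs t := (FI_ge xs t).resolve_left h2
          have ht : t ∈ xs := by by_contra hn; exact h2 (ih.mpr hn)
          constructor
          · intro e; omega
          · intro e; exact absurd (Or.inr ht) e

theorem FI_nonneg (l : List Nat) (t : Nat) (h : t ∈ l) : 0 ≤ FI l t :=
  (FI_ge l t).resolve_left (by rw [FI_neg]; simp [h])

theorem FI_lt (l : List Nat) (t : Nat) (h : t ∈ l) : FI l t < l.length := by
  induction l with
  | nil => simp at h
  | cons x xs ih =>
      rw [FI_cons]
      by_cases hx : x = t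
      · rw [if_pos hx]; simp
      · have ht : t ∈ xs := by cases h with | head => exact absurd rfl hx | tail _ h => exact h
        have h2 : ¬ FI xs t = -1 := by rw [FI_neg]; simp [ht]
        have := ih ht
        rw [if_neg hx, if_neg h2]
        simp only [List.length_cons]
        push_cast
        omega

theorem FI_append_mem (l l' : List Nat) (t : Nat) (h : t ∈ l) : FI (l ++ l') t = FI l t := by
  induction l with
  | nil => simp at h
  | cons x xs ih =>
      by_cases hx : x = t
      · rw [List.cons_append, FI_cons, FI_cons, if_pos hx, if_pos hx]
      · have ht : t ∈ xs := by cases h with | head => exact absurd rfl hx | tail _ h => exact h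
        rw [List.cons_append, FI_cons, FI_cons, ih ht]

theorem FI_append_not_mem (l l' : List Nat) (t : Nat) (h : t ∉ l) :
    FI (l ++ l') t = if FI l' t = -1 then -1 else FI l' t + l.length := by
  induction l with
  | nil => simp
  | cons x xs ih =>
      have hx : x ≠ t := by intro e; exact h (e ▸ List.mem_cons_self)
      have ht : t ∉ xs := fun e => h (List.mem_cons_of_mem _ e)
      rw [List.cons_append, FI_cons, if_neg hx, ih ht]
      by_cases h2 : FI l' t = -1
      · rw [if_pos h2, if_pos h2, if_pos rfl]
      · have h0 : 0 ≤ FI l' t := (FI_ge l' t).resolve_left h2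
        rw [if_neg h2, if_neg h2, if_neg (by push_cast; omega)]
        simp only [List.length_cons]
        push_cast
        ring

theorem LI_ge (l : List Nat) (t : Nat) : LI l t = -1 ∨ 0 ≤ LI l t := by
  induction l with
  | nil => left; rfl
  | cons x xs ih =>
      rw [LI_cons]
      by_cases h2 : LI xs t = -1
      · by_cases hx : x = t
        · right; rw [if_pos h2, if_pos hx]
        · left; rw [if_pos h2, if_neg hx]
      · right; rw [if_neg h2]; rcases ih with h | h; exacts [absurd h h2, by omega]

theorem LI_neg (l : List Nat) (t : Nat) : LI l t = -1 ↔ t ∉ l := by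
  induction l with
  | nil => simp [LI]
  | cons x xs ih =>
      rw [LI_cons, List.mem_cons]
      by_cases h2 : LI xs t = -1
      · have ht : t ∉ xs := ih.mp h2
        rw [if_pos h2]
        by_cases hx : x = t
        · rw [if_pos hx]
          simp [hx]
        · rw [if_neg hx]
          exact ⟨fun _ => by rintro (e | e); exacts [hx e.symm, ht e], fun _ => rfl⟩
      · have h0 : 0 ≤ LI xs t := (LI_ge xs t).resolve_left h2
        have ht : t ∈ xs := by by_contra hn; exact h2 (ih.mpr hn)
        rw [if_neg h2]
        constructor
        · intro e; omega
        · intro e; exact absurd (Or.inr ht) e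

theorem LI_nonneg (l : List Nat) (t : Nat) (h : t ∈ l) : 0 ≤ LI l t :=
  (LI_ge l t).resolve_left (by rw [LI_neg]; simp [h])

theorem LI_append_singleton (l : List Nat) (x t : Nat) :
    LI (l ++ [x]) t = if x = t then (l.length : Int) else LI l t := by
  induction l with
  | nil =>
      rw [List.nil_append, LI_cons]
      by_cases hx : x = t <;> simp [LI, hx]
  | cons y ys ih =>
      rw [List.cons_append, LI_cons, ih]
      by_cases hx : x = t
      · rw [if_pos hx, if_pos hx, if_neg (by omega)]
        simp only [List.length_cons]
        push_cast
        ring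
      · rw [if_neg hx, if_neg hx, LI_cons]

theorem LI_append (l l' : List Nat) (t : Nat) :
    LI (l ++ l') t = if t ∈ l' then LI l' t + l.length else LI l t := by
  induction l with
  | nil =>
      rw [List.nil_append]
      by_cases h : t ∈ l'
      · rw [if_pos h]; simp
      · rw [if_neg h]
        exact (LI_neg l' t).mpr h
  | cons x xs ih =>
      rw [List.cons_append, LI_cons, ih]
      by_cases h : t ∈ l'
      · have h0 : 0 ≤ LI l' t := LI_nonneg _ _ h
        rw [if_pos h, if_pos h, if_neg (by push_cast; omega)]
        simp only [List.length_cons]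
        push_cast
        ring
      · rw [if_neg h, if_neg h, LI_cons]



def fTbl (cs : List Char) (m : Nat) : List Int :=
  (List.range 26).map (fun t => FI ((cs.take m).map wSlot) t)

def lTbl (cs : List Char) (m : Nat) : List Int :=
  (List.range 26).map (fun t => LI ((cs.take m).map wSlot) t)

theorem fTbl_len (cs : List Char) (m : Nat) : (fTbl cs m).length = 26 := by simp [fTbl]

theorem lTbl_len (cs : List Char) (m : Nat) : (lTbl cs m).length = 26 := by simp [lTbl]

set_option maxHeartbeats 1000000 in
theorem loopB1 (cs : List Char) (H : ∀ c ∈ cs, 71 ≤ c.toNat ∧ c.toNat ≤ 122)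
    (m : Nat) (hm : m ≤ cs.length) :
    (PySem.List.pyRange 0 (m : Int)).foldl (stepB1 cs)
      (List.replicate 26 (-1), List.replicate 26 (-1))
    = (fTbl cs m, lTbl cs m) := by
  induction m with
  | zero =>
      show (PySem.List.pyRange 0 0).foldl _ _ = _
      rw [show PySem.List.pyRange 0 0 = [] from rfl]
      simp only [List.foldl_nil]
      rw [Prod.mk.injEq]
      constructor
      · rw [replicate_eq_map]
        unfold fTbl
        exact List.map_congr_left (by intro t _; simp [FI])
      · rw [replicate_eq_map]
        unfold lTbl
        exact List.map_congr_left (by intro t _; simp [LI])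
  | succ m ih =>
      have hml : m < cs.length := by omega
      have hc := H cs[m] (List.getElem_mem hml)
      rw [show ((m + 1 : Nat) : Int) = (m : Int) + 1 by push_cast; ring,
        PySem.List.pyRange_one_succ_right (by positivity), List.foldl_append,
        ih (by omega)]
      simp only [List.foldl_cons, List.foldl_nil, stepB1]
      have hchar : PySem.List.pyGetD cs (m : Int) ' ' = cs[m] := by
        rw [PySem.List.pyGetD_natCast, List.getD_eq_getElem _ _ hml]
      have hlen : ((cs.take m).map wSlot).length = m := by
        simp [List.length_take, Nat.min_eq_left (le_of_lt hml)]
      have htake := take_succ_concat cs m hml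
      have hlx : (cs.take (m + 1)).map wSlot = (cs.take m).map wSlot ++ [wSlot cs[m]] := by
        rw [htake, List.map_append]
        rfl
      have hread : PySem.List.pyGetD (fTbl cs m, lTbl cs m).1
          (((PySem.List.pyGetD cs (m : Int) ' ').toNat : Int) - 97) (-1)
          = FI ((cs.take m).map wSlot) (wSlot cs[m]) := by
        rw [hchar, getK _ (fTbl_len _ _) _ hc.1 hc.2]
        unfold fTbl
        rw [map_range_getD _ _ _ (wSlot_lt _)]
      have hlast : pySetIdx (fTbl cs m, lTbl cs m).2
          (((PySem.List.pyGetD cs (m : Int) ' ').toNat : Int) - 97) ((m : Nat) : Int)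
          = lTbl cs (m + 1) := by
        rw [hchar, setK _ (lTbl_len _ _) _ hc.1 hc.2]
        show (lTbl cs m).set (wSlot cs[m]) _ = _
        unfold lTbl
        rw [map_range_set, hlx]
        apply List.map_congr_left
        intro t _
        rw [LI_append_singleton, hlen]
        by_cases ht : t = wSlot cs[m]
        · rw [if_pos ht, if_pos ht.symm]
        · rw [if_neg ht, if_neg (fun e => ht e.symm)]
      by_cases hmem : wSlot cs[m] ∈ (cs.take m).map wSlot
      · rw [if_neg (by
          rw [hread]
          have h0 : 0 ≤ FI ((cs.take m).map wSlot) (wSlot cs[m]) := FI_nonneg _ _ hmem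
          simp only [beq_iff_eq]
          omega)]
        refine Prod.ext ?_ hlast
        show fTbl cs m = fTbl cs (m + 1)
        unfold fTbl
        rw [hlx]
        apply List.map_congr_left
        intro t _
        by_cases htl : t ∈ (cs.take m).map wSlot
        · rw [FI_append_mem _ _ _ htl]
        · rw [FI_append_not_mem _ _ _ htl]
          have hxt : wSlot cs[m] ≠ t := fun e => htl (e ▸ hmem)
          rw [show FI [wSlot cs[m]] t = -1 by rw [FI_cons]; rw [if_neg hxt]; rfl]
          rw [if_pos rfl, Eq.symm ((FI_neg _ _).mpr htl)]
      · rw [if_pos (by rw [hread, (FI_neg _ _).mpr hmem]; decide)]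
        refine Prod.ext ?_ hlast
        show pySetIdx (fTbl cs m) _ _ = fTbl cs (m + 1)
        rw [hchar, setK _ (fTbl_len _ _) _ hc.1 hc.2]
        show (fTbl cs m).set (wSlot cs[m]) _ = _
        unfold fTbl
        rw [map_range_set, hlx]
        apply List.map_congr_left
        intro t _
        by_cases ht : t = wSlot cs[m]
        · rw [if_pos ht, ht, FI_append_not_mem _ _ _ hmem]
          rw [show FI [wSlot cs[m]] (wSlot cs[m]) = 0 by rw [FI_cons, if_pos rfl]]
          rw [if_neg (by omega), hlen, zero_add]
        · rw [if_neg ht]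
          by_cases htl : t ∈ (cs.take m).map wSlot
          · rw [FI_append_mem _ _ _ htl]
          · rw [FI_append_not_mem _ _ _ htl]
            have hxt : wSlot cs[m] ≠ t := fun e => ht e.symm
            rw [show FI [wSlot cs[m]] t = -1 by rw [FI_cons]; rw [if_neg hxt]; rfl]
            rw [if_pos rfl, Eq.symm ((FI_neg _ _).mpr htl)]

theorem map_split (cs : List Char) (m : Nat) (hml : m < cs.length) :
    cs.map wSlot = (cs.take m).map wSlot ++ (wSlot cs[m] :: (cs.drop (m + 1)).map wSlot) := by
  conv_lhs => rw [← List.take_append_drop m cs]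
  rw [List.map_append, List.drop_eq_getElem_cons hml, List.map_cons]

theorem FI_at (cs : List Char) (m : Nat) (hml : m < cs.length) :
    (FI (cs.map wSlot) (wSlot cs[m]) = (m : Int)) ↔ wSlot cs[m] ∉ (cs.take m).map wSlot := by
  have hlen : ((cs.take m).map wSlot).length = m := by
    simp [List.length_take, Nat.min_eq_left (le_of_lt hml)]
  rw [map_split cs m hml]
  by_cases hx : wSlot cs[m] ∈ (cs.take m).map wSlot
  · rw [FI_append_mem _ _ _ hx]
    have := FI_lt _ _ hx
    rw [hlen] at this
    constructor
    · intro e; omega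
    · intro e; exact absurd hx e
  · rw [FI_append_not_mem _ _ _ hx]
    rw [show FI (wSlot cs[m] :: (cs.drop (m + 1)).map wSlot) (wSlot cs[m]) = 0 by
      rw [FI_cons, if_pos rfl]]
    rw [if_neg (by omega), hlen, zero_add]
    exact iff_of_true rfl hx

theorem LI_at (cs : List Char) (m : Nat) (hml : m < cs.length) :
    (LI (cs.map wSlot) (wSlot cs[m]) = (m : Int)) ↔ wSlot cs[m] ∉ (cs.drop (m + 1)).map wSlot := by
  have hlen : ((cs.take m).map wSlot).length = m := by
    simp [List.length_take, Nat.min_eq_left (le_of_lt hml)]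
  rw [map_split cs m hml, LI_append, if_pos List.mem_cons_self, hlen]
  by_cases hr : wSlot cs[m] ∈ (cs.drop (m + 1)).map wSlot
  · have h0 : 0 ≤ LI ((cs.drop (m + 1)).map wSlot) (wSlot cs[m]) := LI_nonneg _ _ hr
    rw [LI_cons, if_neg (by omega)]
    constructor
    · intro e; omega
    · intro e; exact absurd hr e
  · rw [LI_cons, if_pos ((LI_neg _ _).mpr hr), if_pos rfl, zero_add]
    exact iff_of_true rfl hr

theorem suf0_eq (cs : List Char) :
    ((((PySem.List.pyRange 0 26).filter
        (fun k => PySem.List.pyGetD (lTbl cs cs.length) k (-1) != -1)).length : Nat) : Int)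
      = Dc cs := by
  rw [show (26 : Int) = ((26 : Nat) : Int) by norm_num, PySem.List.pyRange_zero_natCast,
    List.filter_map, List.length_map]
  have h1 : ∀ t ∈ List.range 26,
      ((fun k => PySem.List.pyGetD (lTbl cs cs.length) k (-1) != -1) ∘ (fun k : Nat => (k : Int))) t
        = decide (t ∈ cs.map wSlot) := by
    intro t htm
    rw [List.mem_range] at htm
    simp only [Function.comp_apply]
    rw [PySem.List.pyGetD_natCast]
    unfold lTbl
    rw [map_range_getD _ _ _ htm, List.take_length]
    by_cases hmem : t ∈ cs.map wSlot
    · have := LI_nonneg _ _ hmem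
      simp [hmem, bne_iff_ne]
      omega
    · rw [(LI_neg _ _).mpr hmem]
      simp [hmem]
  rw [List.filter_congr h1]
  have hnodup : ((List.range 26).filter (fun t => decide (t ∈ cs.map wSlot))).Nodup :=
    (List.nodup_range).filter _
  rw [← List.toFinset_card_of_nodup hnodup]
  unfold Dc
  have hset : ((List.range 26).filter (fun t => decide (t ∈ cs.map wSlot))).toFinset
      = (cs.map wSlot).toFinset := by
    ext x
    simp only [List.mem_toFinset, List.mem_filter, List.mem_range, decide_eq_true_eq]
    constructor
    · exact fun h => h.2
    · intro h
      refine ⟨?_, h⟩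
      obtain ⟨c, _, rfl⟩ := List.mem_map.mp h
      exact wSlot_lt c
  rw [hset]

set_option maxHeartbeats 1000000 in
theorem loopB2 (cs : List Char) (H : ∀ c ∈ cs, 71 ≤ c.toNat ∧ c.toNat ≤ 122)
    (m : Nat) (hm : m ≤ cs.length) :
    (PySem.List.pyRange 0 (m : Int)).foldl (stepB2 cs (fTbl cs cs.length, lTbl cs cs.length))
      (0, Dc cs, 0)
    = (Dc (cs.take m), Dc (cs.drop m),
       (((List.range m).countP (fun j => Dc (cs.take (j + 1)) == Dc (cs.drop (j + 1)))) : Int)) := by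
  induction m with
  | zero =>
      show (PySem.List.pyRange 0 0).foldl _ _ = _
      rw [show PySem.List.pyRange 0 0 = [] from rfl]
      simp [Dc_nil]
  | succ m ih =>
      have hml : m < cs.length := by omega
      have hc := H cs[m] (List.getElem_mem hml)
      rw [show ((m + 1 : Nat) : Int) = (m : Int) + 1 by push_cast; ring,
        PySem.List.pyRange_one_succ_right (by positivity), List.foldl_append,
        ih (by omega)]
      simp only [List.foldl_cons, List.foldl_nil, stepB2]
      have hchar : PySem.List.pyGetD cs (m : Int) ' ' = cs[m] := by
        rw [PySem.List.pyGetD_natCast, List.getD_eq_getElem _ _ hml]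
      have htake := take_succ_concat cs m hml
      have hdrop : cs.drop m = cs[m] :: cs.drop (m + 1) := List.drop_eq_getElem_cons hml
      have hreadF : PySem.List.pyGetD (fTbl cs cs.length, lTbl cs cs.length).1
          (((PySem.List.pyGetD cs (m : Int) ' ').toNat : Int) - 97) (-1)
          = FI (cs.map wSlot) (wSlot cs[m]) := by
        rw [hchar, getK _ (fTbl_len _ _) _ hc.1 hc.2]
        unfold fTbl
        rw [map_range_getD _ _ _ (wSlot_lt _), List.take_length]
      have hreadL : PySem.List.pyGetD (fTbl cs cs.length, lTbl cs cs.length).2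
          (((PySem.List.pyGetD cs (m : Int) ' ').toNat : Int) - 97) (-1)
          = LI (cs.map wSlot) (wSlot cs[m]) := by
        rw [hchar, getK _ (lTbl_len _ _) _ hc.1 hc.2]
        unfold lTbl
        rw [map_range_getD _ _ _ (wSlot_lt _), List.take_length]
      have hpref : (if PySem.List.pyGetD (fTbl cs cs.length, lTbl cs cs.length).1
            (((PySem.List.pyGetD cs (m : Int) ' ').toNat : Int) - 97) (-1) == ((m : Nat) : Int)
          then Dc (cs.take m) + 1 else Dc (cs.take m)) = Dc (cs.take (m + 1)) := by
        rw [hreadF, htake, Dc_append]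
        by_cases hmem : wSlot cs[m] ∈ (cs.take m).map wSlot
        · rw [if_neg (by simp only [beq_iff_eq]; rw [FI_at cs m hml]; exact not_not_intro hmem), if_pos hmem,
            add_zero]
        · rw [if_pos (by simp only [beq_iff_eq]; rw [FI_at cs m hml]; exact hmem), if_neg hmem]
      have hsuf : (if PySem.List.pyGetD (fTbl cs cs.length, lTbl cs cs.length).2
            (((PySem.List.pyGetD cs (m : Int) ' ').toNat : Int) - 97) (-1) == ((m : Nat) : Int)
          then Dc (cs.drop m) - 1 else Dc (cs.drop m)) = Dc (cs.drop (m + 1)) := by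
        rw [hreadL, hdrop, Dc_cons]
        by_cases hmem : wSlot cs[m] ∈ (cs.drop (m + 1)).map wSlot
        · rw [if_neg (by simp only [beq_iff_eq]; rw [LI_at cs m hml]; exact not_not_intro hmem), if_pos hmem,
            add_zero]
        · rw [if_pos (by simp only [beq_iff_eq]; rw [LI_at cs m hml]; exact hmem), if_neg hmem]
          ring
      rw [hpref, hsuf]
      rw [Prod.mk.injEq, Prod.mk.injEq]
      refine ⟨rfl, rfl, ?_⟩
      rw [List.range_succ, List.countP_append]
      by_cases heq : Dc (cs.take (m + 1)) == Dc (cs.drop (m + 1))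
      · rw [if_pos heq]
        rw [List.countP_cons]
        simp [heq]
      · rw [if_neg (by simpa using heq)]
        rw [List.countP_cons]
        simp only [List.countP_nil]
        rw [show ((Dc (cs.take (m + 1)) == Dc (cs.drop (m + 1))) = false) from by simpa using heq]
        simp

set_option maxHeartbeats 1000000 in
theorem main_eq (s : String)
    (hne : s.toList ≠ []) (H : ∀ c ∈ s.toList, 71 ≤ c.toNat ∧ c.toNat ≤ 122) :
    solution s = solution_alt s := by
  have hlen : 1 ≤ s.toList.length := List.length_pos_of_ne_nil hne
  unfold solution solution_alt
  dsimp only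
  rw [loopA1 s.toList H s.toList.length le_rfl,
      loopB1 s.toList H s.toList.length le_rfl]
  have hcast : ((s.toList.length : Int) - 1) = (((s.toList.length - 1 : Nat)) : Int) := by
    push_cast [hlen]; ring
  rw [hcast]
  have hinit1 : pySetIdx (List.replicate s.toList.length 0)
      (((s.toList.length - 1 : Nat)) : Int) 0 = sufA s.toList (s.toList.length - 1) := by
    rw [setI, replicate_eq_map, map_range_set]
    unfold sufA
    apply List.map_congr_left
    intro j hj
    rw [List.mem_range] at hj
    by_cases hj1 : j = s.toList.length - 1
    · rw [if_pos hj1, if_pos (by omega),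
        show j + 1 = s.toList.length by omega, List.drop_length, Dc_nil]
    · rw [if_neg hj1, if_neg (by omega)]
  have hinit2 : (List.replicate 26 0 : List Int)
      = tbl (s.toList.drop ((s.toList.length - 1) + 1)) := by
    rw [show (s.toList.length - 1) + 1 = s.toList.length by omega, List.drop_length, tbl_nil]
  rw [hinit1, hinit2]
  obtain ⟨fr, hA2⟩ := loopA2 s.toList H (s.toList.length - 1) le_rfl
  rw [hA2]
  dsimp only
  rw [suf0_eq, loopB2 s.toList H s.toList.length le_rfl]
  dsimp only
  rw [PySem.List.foldl_count_if, zero_add, PySem.List.pyRange_zero_natCast, List.countP_map]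
  congr 1
  apply List.countP_congr
  intro j hj
  rw [List.mem_range] at hj
  simp only [Function.comp_apply]
  rw [PySem.List.pyGetD_natCast, PySem.List.pyGetD_natCast]
  unfold preA
  rw [map_range_getD _ _ _ hj, map_range_getD _ _ _ hj, if_pos hj]

-- ===== VERDICT (by name: the statement is the Claim_ definition above) =====
theorem solution_spec : Claim_equal_solution := by
  intro s _ hp
  refine main_eq s hp.1 ?_
  intro c hc
  have hcc := List.all_eq_true.mp hp.2 c hc
  simp only [Bool.and_eq_true, decide_eq_true_eq] at hcc
  exact hcc
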